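-- pv_equiv track=rewrite | github.com/nabilera1/codingTestPython | 2024 파이썬 기초/문자열 속 2개 문자 연속 여부 문제.py | find_non_consecutive_repeated_chars
-- ===== SOURCE A (Python) =====
-- def find_non_consecutive_repeated_chars(s):
--     from collections import defaultdict
--
--     # Initialize a dictionary to keep track of character occurrences
--     char_positions = defaultdict(list)
--
--     # Store the positions of each character in the string
--     for index, char in enumerate(s):
--         char_positions[char].append(index)
--
--     # List to hold valid characters that meet the condition
--     valid_chars = []
--
--     # Check each character's positions
--     for char, positions in char_positions.items():
--         if len(positions) >= 2:
--             # Check if the character appears at least twice and is not consecutive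
--             for i in range(1, len(positions)):
--                 if positions[i] > positions[i - 1] + 1:
--                     valid_chars.append(char)
--                     break
--
--     # Sort the valid characters alphabetically
--     valid_chars.sort()
--
--     # Return the result as a string or 'N' if no valid characters found
--     return ''.join(valid_chars) if valid_chars else 'N'
-- ===== SOURCE B (Python) =====
-- def find_non_consecutive_repeated_chars(s):
--     # Single streaming pass: remember each char's most recent index; a char
--     # qualifies as soon as it reappears with a gap after its previous occurrence.
--     last_index = {}
--     valid = set()
--     for i, ch in enumerate(s):
--         if ch in last_index and last_index[ch] + 1 < i:
--             valid.add(ch)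
--         last_index[ch] = i
--     return ''.join(sorted(valid)) if valid else 'N'
-- ===== Notes on version B (the rewrite author's own statement) =====
-- stated objective: simpler
-- what changed: Replaces A's two-phase build-all-position-lists-then-nested-gap-scan with a single streaming pass that keeps only each character's last index and a set of characters already seen to reappear non-consecutively.
import Mathlib
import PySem

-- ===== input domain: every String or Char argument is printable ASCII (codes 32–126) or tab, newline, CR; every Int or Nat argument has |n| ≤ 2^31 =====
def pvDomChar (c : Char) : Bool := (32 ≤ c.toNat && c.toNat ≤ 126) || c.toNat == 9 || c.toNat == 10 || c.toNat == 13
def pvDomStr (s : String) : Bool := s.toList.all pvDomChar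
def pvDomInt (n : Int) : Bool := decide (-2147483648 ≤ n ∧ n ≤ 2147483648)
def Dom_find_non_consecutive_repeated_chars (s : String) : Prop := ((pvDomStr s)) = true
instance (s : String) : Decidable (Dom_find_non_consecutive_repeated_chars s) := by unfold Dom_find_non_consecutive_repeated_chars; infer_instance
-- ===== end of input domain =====

-- B replaces A's build-all-position-lists-then-nested-gap-scan with one streaming pass
-- keeping only a last-index dict and a found-set (objective: simpler).

-- ===== PORT A =====
-- A's inner 'for i in range(1, len(positions)): if …: valid_chars.append(char); break' —
-- the loop's only effect is one append guarded by the break, i.e. whether any i hits the test.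
def pvGapScanA (pos : List Int) : Bool :=
  (PySem.List.pyRange 1 (PySem.List.len pos) 1).any
    (fun i => decide (PySem.List.pyGetD pos (i-1) 0 + 1 < PySem.List.pyGetD pos i 0))

def find_non_consecutive_repeated_chars (s : String) : String :=
  let char_positions : PySem.Dict Char (List Int) :=
    (PySem.List.enumerate s.toList 0).foldl
      (fun d p => d.modify p.2 [] (· ++ [p.1])) PySem.Dict.empty
  let valid_chars : List Char :=
    char_positions.items.foldl
      (fun acc p =>
        if 2 ≤ p.2.length then
          (if pvGapScanA p.2 = true then acc ++ [p.1] else acc)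
        else acc) []
  let sortedv := PySem.List.sorted valid_chars (fun c => c) false
  if sortedv ≠ [] then String.ofList sortedv else "N"

-- ===== PORT B =====
def find_non_consecutive_repeated_chars_alt (s : String) : String :=
  let st :=
    (PySem.List.enumerate s.toList 0).foldl
      (fun (st : PySem.Dict Char Int × PySem.Set Char) p =>
        let valid :=
          match st.1.get? p.2 with
          | some j => if j + 1 < p.1 then PySem.Set.add st.2 p.2 else st.2
          | none => st.2
        (st.1.insert p.2 p.1, valid))
      (PySem.Dict.empty, PySem.Set.empty)
  if st.2 ≠ [] then String.ofList (PySem.List.sorted st.2 (fun c => c) false) else "N"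

-- ===== PRECONDITION & SPEC =====
def Spec_find_non_consecutive_repeated_chars (s : String) (out : String) : Prop := out = find_non_consecutive_repeated_chars_alt s
instance (s : String) (out : String) : Decidable (Spec_find_non_consecutive_repeated_chars s out) := by unfold Spec_find_non_consecutive_repeated_chars; infer_instance

-- ===== CLAIM (what is proved, stated in full; the proofs are below) =====
def Claim_equal_find_non_consecutive_repeated_chars : Prop := ∀ (s : String), Dom_find_non_consecutive_repeated_chars s → Spec_find_non_consecutive_repeated_chars s (find_non_consecutive_repeated_chars s)

-- ===== LEMMAS AND PROOFS =====

-- indices at which c occurs in t (what A's dict stores under c)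
def pvPos (c : Char) (t : List Char) : List Int :=
  ((PySem.List.enumerate t 0).filter (fun p => p.2 == c)).map (·.1)

-- structural form of A's gap scan
def pvHasGap : List Int → Bool
  | [] => false
  | [_] => false
  | a :: b :: t => (decide (a + 1 < b)) || pvHasGap (b :: t)

theorem pvHasGap_true_iff (l : List Int) :
    pvHasGap l = true ↔ ∃ k : Nat, k + 1 < l.length ∧ l.getD k 0 + 1 < l.getD (k+1) 0 := by
  induction l with
  | nil => simp [pvHasGap]
  | cons a t ih =>
    cases t with
    | nil => simp [pvHasGap]
    | cons b t2 =>
      simp only [pvHasGap, Bool.or_eq_true, decide_eq_true_eq, ih]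
      constructor
      · rintro (h | ⟨k, hk, hlt⟩)
        · exact ⟨0, by simp, by simpa using h⟩
        · exact ⟨k + 1, by simpa using hk, by simpa using hlt⟩
      · rintro ⟨k, hk, hlt⟩
        cases k with
        | zero => exact Or.inl (by simpa using hlt)
        | succ k => exact Or.inr ⟨k, by simpa using hk, by simpa using hlt⟩

theorem pvGapScanA_eq (pos : List Int) : pvGapScanA pos = pvHasGap pos := by
  have h : pvGapScanA pos = true ↔ pvHasGap pos = true := by
    rw [pvHasGap_true_iff]
    unfold pvGapScanA
    rw [List.any_eq_true]
    constructor
    · rintro ⟨i, hi, hcond⟩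
      rw [PySem.List.len_eq, PySem.List.mem_pyRange_one] at hi
      obtain ⟨h1, h2⟩ := hi
      refine ⟨i.toNat - 1, by omega, ?_⟩
      rw [PySem.List.pyGetD_of_nonneg pos 0 (by omega),
          PySem.List.pyGetD_of_nonneg pos 0 (by omega)] at hcond
      have e1 : (i - 1).toNat = i.toNat - 1 := by omega
      have e2 : i.toNat = (i.toNat - 1) + 1 := by omega
      rw [e1, e2] at hcond
      simpa using hcond
    · rintro ⟨k, hk, hlt⟩
      refine ⟨(k : Int) + 1, ?_, ?_⟩
      · rw [PySem.List.len_eq, PySem.List.mem_pyRange_one]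
        omega
      · rw [PySem.List.pyGetD_of_nonneg pos 0 (by omega),
            PySem.List.pyGetD_of_nonneg pos 0 (by omega)]
        have e1 : ((k : Int) + 1 - 1).toNat = k := by omega
        have e2 : ((k : Int) + 1).toNat = k + 1 := by omega
        rw [e1, e2]
        simpa using hlt
  cases ha : pvGapScanA pos <;> cases hb : pvHasGap pos <;> simp_all

theorem pvHasGap_concat (l : List Int) (i : Int) :
    pvHasGap (l ++ [i]) =
      (pvHasGap l ||
        (match l.getLast? with
         | none => false
         | some j => decide (j + 1 < i))) := by
  induction l with
  | nil => simp [pvHasGap]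
  | cons a t ih =>
    cases t with
    | nil => simp [pvHasGap]
    | cons b t2 =>
      have : ((a :: b :: t2) ++ [i]) = a :: ((b :: t2) ++ [i]) := by simp
      rw [this]
      show (decide (a + 1 < b) || pvHasGap ((b :: t2) ++ [i])) = _
      rw [ih]
      simp [pvHasGap, Bool.or_assoc]

theorem pvHasGap_two_le (l : List Int) (h : pvHasGap l = true) : 2 ≤ l.length := by
  match l with
  | [] => simp [pvHasGap] at h
  | [_] => simp [pvHasGap] at h
  | _ :: _ :: _ => simp

theorem pvPos_concat (c : Char) (t : List Char) (x : Char) :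
    pvPos c (t ++ [x]) = pvPos c t ++ (if x == c then [(t.length : Int)] else []) := by
  unfold pvPos
  rw [PySem.List.enumerate_append]
  have : PySem.List.enumerate [x] (0 + (t.length : Int)) = [((t.length : Int), x)] := by
    simp [PySem.List.enumerate_cons, PySem.List.enumerate_nil]
  rw [this, List.filter_append, List.map_append]
  by_cases h : x = c
  · simp [h]
  · simp [h]

theorem pvPos_ne_nil_mem (c : Char) (t : List Char) (h : pvPos c t ≠ []) : c ∈ t := by
  unfold pvPos at h
  rcases List.exists_mem_of_ne_nil _ h with ⟨y, hy⟩
  rcases List.mem_map.mp hy with ⟨p, hp, _⟩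
  have hmem := (List.mem_filter.mp hp).1
  have hc : p.2 = c := by simpa using (List.mem_filter.mp hp).2
  rcases (PySem.List.mem_enumerate_iff _ _ _).mp hmem with ⟨k, hk, rfl⟩
  subst hc
  exact List.getElem_mem hk

-- the dict A builds, and the valid-chars list it extracts
def pvDictA (t : List Char) : PySem.Dict Char (List Int) :=
  (PySem.List.enumerate t 0).foldl
    (fun d p => d.modify p.2 [] (· ++ [p.1])) PySem.Dict.empty

def pvValidA (t : List Char) : List Char :=
  (pvDictA t).items.foldl
    (fun acc p =>
      if 2 ≤ p.2.length then
        (if pvGapScanA p.2 = true then acc ++ [p.1] else acc)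
      else acc) []

theorem pvDictA_getD (t : List Char) (c : Char) :
    (pvDictA t).getD c [] = pvPos c t := by
  unfold pvDictA
  have hfold :
      (PySem.List.enumerate t 0).foldl
        (fun d p => d.modify p.2 [] (· ++ [p.1])) PySem.Dict.empty
      = ((PySem.List.enumerate t 0).map (fun p => (p.2, p.1))).foldl
          (fun d p => d.modify p.1 [] (· ++ [p.2])) PySem.Dict.empty := by
    rw [List.foldl_map]
  rw [hfold, PySem.Dict.getD_foldl_modify_append]
  rw [List.filter_map, List.map_map]
  simp only [PySem.Dict.getD_empty, List.nil_append]
  unfold pvPos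
  congr 1

theorem pvDictA_keys (t : List Char) : (pvDictA t).keys = PySem.Set.ofList t := by
  unfold pvDictA
  rw [PySem.Dict.keys_foldl_modify_key (PySem.List.enumerate t 0) (fun p => p.2) []
        (fun _ p => (· ++ [p.1])) PySem.Dict.empty]
  rw [PySem.List.map_snd_enumerate]
  simp [PySem.Dict.keys_empty, PySem.Set.update_nil_left]

theorem pvDictA_nodup (t : List Char) : (pvDictA t).keys.Nodup := by
  unfold pvDictA
  exact PySem.Dict.nodup_keys_foldl_modify_key (PySem.List.enumerate t 0) (fun p => p.2) []
    (fun _ p => (· ++ [p.1])) PySem.Dict.empty (by simp [PySem.Dict.keys_empty])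

theorem pvValidA_eq (t : List Char) :
    pvValidA t = (PySem.Set.ofList t).filter
      (fun c => decide (2 ≤ (pvPos c t).length ∧ pvGapScanA (pvPos c t) = true)) := by
  unfold pvValidA
  have hstep :
      (fun (acc : List Char) (p : Char × List Int) =>
        if 2 ≤ p.2.length then
          (if pvGapScanA p.2 = true then acc ++ [p.1] else acc)
        else acc)
      = (fun acc p =>
          if 2 ≤ p.2.length ∧ pvGapScanA p.2 = true then acc ++ [p.1] else acc) := by
    funext acc p
    split_ifs <;> simp_all
  rw [hstep, PySem.List.foldl_append_ite
        (fun (p : Char × List Int) => 2 ≤ p.2.length ∧ pvGapScanA p.2 = true) (·.1)]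
  rw [PySem.Dict.items_eq_map_keys (pvDictA t) (pvDictA_nodup t) []]
  rw [pvDictA_keys, List.filter_map, List.map_map]
  simp only [List.nil_append, pvDictA_getD]
  have h1 : ((fun x : Char × List Int => x.1) ∘ fun k => (k, pvPos k t)) = id := rfl
  have h2 : ((fun x : Char × List Int => decide (2 ≤ x.2.length ∧ pvGapScanA x.2 = true)) ∘
      fun k => (k, pvPos k t))
      = (fun c => decide (2 ≤ (pvPos c t).length ∧ pvGapScanA (pvPos c t) = true)) := rfl
  rw [h1, h2, List.map_id]

theorem pvValidA_mem (t : List Char) (c : Char) :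
    c ∈ pvValidA t ↔ c ∈ t ∧ 2 ≤ (pvPos c t).length ∧ pvHasGap (pvPos c t) = true := by
  rw [pvValidA_eq, List.mem_filter, PySem.Set.mem_ofList, pvGapScanA_eq]
  simp

theorem pvValidA_nodup (t : List Char) : (pvValidA t).Nodup := by
  rw [pvValidA_eq]
  exact (PySem.Set.nodup_ofList t).filter _

-- the state B's streaming pass builds
def pvStB (t : List Char) : PySem.Dict Char Int × PySem.Set Char :=
  (PySem.List.enumerate t 0).foldl
    (fun (st : PySem.Dict Char Int × PySem.Set Char) p =>
      let valid :=
        match st.1.get? p.2 with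
        | some j => if j + 1 < p.1 then PySem.Set.add st.2 p.2 else st.2
        | none => st.2
      (st.1.insert p.2 p.1, valid))
    (PySem.Dict.empty, PySem.Set.empty)

theorem pvSet_nodup_add (s : PySem.Set Char) (x : Char) (h : s.Nodup) :
    (PySem.Set.add s x).Nodup := by
  unfold PySem.Set.add
  split
  · exact h
  · next hnc =>
    have hx : x ∉ s := by simpa [PySem.Set.contains] using hnc
    simp only [List.nodup_append, List.nodup_singleton, h, true_and]
    intro a ha b hb
    rcases List.mem_singleton.mp hb with rfl
    exact fun h' => hx (h' ▸ ha)

theorem pvStB_inv (t : List Char) :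
    (∀ c, (pvStB t).1.get? c = (pvPos c t).getLast?) ∧
    (pvStB t).2.Nodup ∧
    (∀ c, c ∈ (pvStB t).2 ↔ pvHasGap (pvPos c t) = true) := by
  induction t using List.reverseRecOn with
  | nil =>
    refine ⟨fun c => ?_, by simp [pvStB, PySem.List.enumerate_nil], fun c => ?_⟩
    · simp [pvStB, PySem.List.enumerate_nil, PySem.Dict.get?_empty, pvPos,
        PySem.List.enumerate_nil]
    · simp [pvStB, PySem.List.enumerate_nil, PySem.Set.empty, pvPos, pvHasGap]
  | append_singleton t x ih =>
    obtain ⟨ihget, ihnodup, ihmem⟩ := ih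
    have hstep : pvStB (t ++ [x]) =
        (let st := pvStB t
         let valid :=
           match st.1.get? x with
           | some j => if j + 1 < (t.length : Int) then PySem.Set.add st.2 x else st.2
           | none => st.2
         (st.1.insert x (t.length : Int), valid)) := by
      unfold pvStB
      rw [PySem.List.enumerate_append, List.foldl_append]
      have : PySem.List.enumerate [x] (0 + (t.length : Int)) = [((t.length : Int), x)] := by
        simp [PySem.List.enumerate_cons, PySem.List.enumerate_nil]
      rw [this]
      simp
    rw [hstep]
    simp only []
    refine ⟨fun c => ?_, ?_, fun c => ?_⟩
    · -- last-index component
      rw [PySem.Dict.get?_insert]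
      by_cases hc : c = x
      · subst hc
        rw [if_pos rfl, pvPos_concat]
        simp
      · rw [if_neg hc, pvPos_concat, if_neg (by simpa using Ne.symm hc)]
        simpa using ihget c
    · -- nodup of the found-set
      rw [ihget x]
      cases hlast : (pvPos x t).getLast? with
      | none => exact ihnodup
      | some j =>
        dsimp only
        split_ifs with h
        · exact pvSet_nodup_add _ _ ihnodup
        · exact ihnodup
    · -- membership characterisation
      rw [ihget x]
      by_cases hc : c = x
      · subst hc
        rw [pvPos_concat, if_pos (by simp), pvHasGap_concat]
        cases hlast : (pvPos c t).getLast? with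
        | none =>
          simp only [Bool.or_false, ihmem c]
        | some j =>
          dsimp only
          split_ifs with h
          · rw [PySem.Set.mem_add]
            simp [ihmem c, h]
          · simp only [Bool.or_eq_true, decide_eq_true_eq, ihmem c]
            constructor
            · exact Or.inl
            · rintro (hg | hlt)
              · exact hg
              · omega
      · have hpos : pvPos c (t ++ [x]) = pvPos c t := by
          rw [pvPos_concat, if_neg (by simpa using Ne.symm hc)]
          simp
        rw [hpos]
        cases hlast : (pvPos x t).getLast? with
        | none => exact ihmem c
        | some j =>
          dsimp only
          split_ifs with h
          · rw [PySem.Set.mem_add]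
            constructor
            · rintro (hm | rfl)
              · exact (ihmem c).mp hm
              · exact absurd rfl hc
            · exact fun hg => Or.inl ((ihmem c).mpr hg)
          · exact ihmem c

theorem pv_mem_iff (t : List Char) (c : Char) :
    c ∈ pvValidA t ↔ c ∈ (pvStB t).2 := by
  rw [pvValidA_mem, (pvStB_inv t).2.2 c]
  constructor
  · exact fun h => h.2.2
  · intro hg
    have h2 := pvHasGap_two_le _ hg
    have hne : pvPos c t ≠ [] := by
      intro h; rw [h] at h2; simp at h2
    exact ⟨pvPos_ne_nil_mem c t hne, h2, hg⟩

-- ===== VERDICT (by name: the statement is the Claim_ definition above) =====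
theorem find_non_consecutive_repeated_chars_spec : Claim_equal_find_non_consecutive_repeated_chars := by
  intro s _
  unfold Spec_find_non_consecutive_repeated_chars
  show (if PySem.List.sorted (pvValidA s.toList) (fun c => c) false ≠ [] then
          String.ofList (PySem.List.sorted (pvValidA s.toList) (fun c => c) false)
        else "N")
     = (if (pvStB s.toList).2 ≠ [] then
          String.ofList (PySem.List.sorted (pvStB s.toList).2 (fun c => c) false)
        else "N")
  have hperm : (pvValidA s.toList).Perm (pvStB s.toList).2 :=
    (List.perm_ext_iff_of_nodup (pvValidA_nodup _) (pvStB_inv s.toList).2.1).mpr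
      (pv_mem_iff s.toList)
  have hsort : PySem.List.sorted (pvValidA s.toList) (fun c => c) false
      = PySem.List.sorted (pvStB s.toList).2 (fun c => c) false :=
    PySem.List.sorted_eq_sorted_of_perm _ _ _ (fun _ _ h => h) hperm
  rw [hsort]
  by_cases h : (pvStB s.toList).2 = []
  · rw [if_neg (by simp [PySem.List.sorted_eq_nil_iff, h]), if_neg (by simp [h])]
  · rw [if_pos (by simp [PySem.List.sorted_eq_nil_iff, h]), if_pos (by simp [h])]
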